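-- pv_equiv track=rewrite | github.com/joe-rac/shopify | orders.py | keysFromOrderNums
-- ===== SOURCE A (Python) =====
-- def keysFromOrderNums(orderDictKeys):
--     keys = []
--     for odk in orderDictKeys:
--         toks = odk.split('-')
--         orderNum = toks[0]
--         if len(orderNum) == 4:
--             orderNum = ' '+orderNum
--         if len(toks) == 2:
--             orderNum += '-'+toks[1]
--         keys.append(orderNum)
--     keys = sorted(keys)
--     keys2 = []
--     for key in keys:
--         if key.startswith(' '):
--             key = key[1:]
--         keys2.append(key)
--     return keys2
-- ===== SOURCE B (Python) =====
-- def keysFromOrderNums(orderDictKeys):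
--     def decorate(odk):
--         toks = odk.split('-')
--         orderNum = toks[0]
--         if len(orderNum) == 4:
--             orderNum = ' ' + orderNum
--         if len(toks) == 2:
--             orderNum += '-' + toks[1]
--         return orderNum
--     sorted_keys = []
--     for odk in orderDictKeys:
--         k = decorate(odk)
--         i = 0
--         while i < len(sorted_keys) and sorted_keys[i] <= k:
--             i += 1
--         sorted_keys.insert(i, k)
--     return [k[1:] if k.startswith(' ') else k for k in sorted_keys]
-- ===== Notes on version B (the rewrite author's own statement) =====
-- stated objective: alternative
-- what changed: A decorates all keys into a list, calls the library sort, then strips in a separate pass; B sorts online with a hand-written insertion scan (insert each decorated key into its place as it is produced) and strips with a single map, so there is no separate sort call or undecorate loop.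
import Mathlib
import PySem

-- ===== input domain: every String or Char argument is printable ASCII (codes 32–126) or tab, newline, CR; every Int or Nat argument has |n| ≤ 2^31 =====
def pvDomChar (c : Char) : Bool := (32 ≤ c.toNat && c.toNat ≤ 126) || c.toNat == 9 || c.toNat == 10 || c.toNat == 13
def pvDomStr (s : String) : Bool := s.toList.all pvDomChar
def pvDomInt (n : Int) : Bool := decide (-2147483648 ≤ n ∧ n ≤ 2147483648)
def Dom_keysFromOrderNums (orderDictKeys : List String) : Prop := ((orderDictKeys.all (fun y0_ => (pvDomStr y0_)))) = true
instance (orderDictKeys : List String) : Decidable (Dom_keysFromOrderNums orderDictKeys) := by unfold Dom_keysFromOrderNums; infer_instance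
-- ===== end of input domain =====

-- B replaces A's decorate-list / library-sort / separate strip loop by a single online
-- insertion pass (hand insertion sort) followed by one strip map; objective: alternative.

-- ===== PORT A =====
def keysFromOrderNums (orderDictKeys : List String) : List String :=
  let keys := orderDictKeys.foldl (fun keys odk =>
    let toks := (PySem.Str.split? odk "-").getD []     -- sep "-" ≠ "" so split? is never none
    let orderNum := toks.headD ""                      -- toks[0]; split result is never empty
    let orderNum := if PySem.Str.len orderNum == 4 then " " ++ orderNum else orderNum
    let orderNum := if toks.length == 2 then orderNum ++ ("-" ++ toks.getD 1 "") else orderNum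
    keys ++ [orderNum]) []
  let keys := PySem.List.sorted keys (fun x => x)
  keys.foldl (fun keys2 key =>
    let key := if PySem.Str.startswith key " " then PySem.Str.slice key (some 1) none else key
    keys2 ++ [key]) []

-- ===== PORT B =====
-- Source B's decorate helper
def pvDecorate (odk : String) : String :=
  let toks := (PySem.Str.split? odk "-").getD []       -- sep "-" ≠ "" so split? is never none
  let orderNum := toks.headD ""                        -- toks[0]; split result is never empty
  let orderNum := if PySem.Str.len orderNum == 4 then " " ++ orderNum else orderNum
  if toks.length == 2 then orderNum ++ ("-" ++ toks.getD 1 "") else orderNum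

-- Source B's while-scan + list.insert: walk past the elements ≤ k, put k there
def pvInsert (k : String) : List String → List String
  | [] => [k]
  | x :: xs => if x ≤ k then x :: pvInsert k xs else k :: x :: xs

def pvStrip (k : String) : String :=
  if PySem.Str.startswith k " " then PySem.Str.slice k (some 1) none else k

def keysFromOrderNums_alt (orderDictKeys : List String) : List String :=
  (orderDictKeys.foldl (fun sortedKeys odk => pvInsert (pvDecorate odk) sortedKeys) []).map pvStrip

-- ===== PRECONDITION & SPEC =====
def Spec_keysFromOrderNums (orderDictKeys : List String) (out : List String) : Prop := out = keysFromOrderNums_alt orderDictKeys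
instance (orderDictKeys : List String) (out : List String) : Decidable (Spec_keysFromOrderNums orderDictKeys out) := by unfold Spec_keysFromOrderNums; infer_instance

-- ===== CLAIM (what is proved, stated in full; the proofs are below) =====
def Claim_equal_keysFromOrderNums : Prop := ∀ (orderDictKeys : List String), Dom_keysFromOrderNums orderDictKeys → Spec_keysFromOrderNums orderDictKeys (keysFromOrderNums orderDictKeys)

-- ===== LEMMAS AND PROOFS =====

-- Source B's insertion scan is PySem's insertBy with the strict-< predicate
theorem pvInsert_eq_insertBy (k : String) (l : List String) :
    pvInsert k l = PySem.List.insertBy (fun a b => decide (a < b)) k l := by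
  induction l with
  | nil => rfl
  | cons x xs ih =>
    simp only [pvInsert, PySem.List.insertBy]
    by_cases h : x ≤ k
    · rw [if_pos h, if_neg (by simpa using h), ih]
    · rw [if_neg h, if_pos (by simpa using lt_of_not_ge h)]

-- the online insertion pass computes Python's sorted(·)
theorem foldl_pvInsert_eq_sorted (l : List String) :
    List.foldl (fun acc k => pvInsert k acc) [] l = PySem.List.sorted l (fun x => x) := by
  rw [PySem.List.sorted_eq_foldl_insertBy]
  have : (fun (acc : List String) (k : String) => pvInsert k acc)
      = (fun acc k => PySem.List.insertBy (fun a b => decide (a < b)) k acc) :=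
    funext fun acc => funext fun k => pvInsert_eq_insertBy k acc
  rw [this]

-- ===== VERDICT (by name: the statement is the Claim_ definition above) =====
theorem keysFromOrderNums_spec : Claim_equal_keysFromOrderNums := by
  intro xs _
  show keysFromOrderNums xs = keysFromOrderNums_alt xs
  unfold keysFromOrderNums keysFromOrderNums_alt
  have h1 : (fun (keys : List String) (odk : String) =>
      let toks := (PySem.Str.split? odk "-").getD []
      let orderNum := toks.headD ""
      let orderNum := if PySem.Str.len orderNum == 4 then " " ++ orderNum else orderNum
      let orderNum := if toks.length == 2 then orderNum ++ ("-" ++ toks.getD 1 "") else orderNum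
      keys ++ [orderNum]) = (fun keys odk => keys ++ [pvDecorate odk]) := rfl
  have h2 : (fun (keys2 : List String) (key : String) =>
      let key := if PySem.Str.startswith key " " then PySem.Str.slice key (some 1) none else key
      keys2 ++ [key]) = (fun keys2 key => keys2 ++ [pvStrip key]) := rfl
  rw [h1, h2, PySem.List.foldl_append_singleton_eq_map, PySem.List.foldl_append_singleton_eq_map,
    List.nil_append, List.nil_append]
  have h3 : List.foldl (fun sortedKeys odk => pvInsert (pvDecorate odk) sortedKeys) ([] : List String) xs
      = List.foldl (fun acc k => pvInsert k acc) [] (xs.map pvDecorate) := by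
    rw [List.foldl_map]
  rw [h3, foldl_pvInsert_eq_sorted]
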